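-- pv_equiv track=rewrite | github.com/manu3293/CF_Calculator | main.py | calcola_nome
-- ===== SOURCE A (Python) =====
-- vocali = set('aeiou')
--
-- consonanti = set('bcdfghjklmnpqrstvwxyz')
--
-- def calcola_nome(nome):
--     """
--     The function "calcola_nome" takes a name as input, removes spaces, extracts vowels and consonants,
--     and returns the first three letters alternating between consonants and vowels or 'X' if needed.
--
--     :param nome: The function `calcola_nome` takes a name as input, removes any spaces in the name, and
--     then extracts the vowels and consonants from the name. It then constructs a new name by alternating
--     between consonants and vowels (or 'X' if there are not enough letters) until the new
--     :return: The function `calcola_nome` takes a name as input, removes any spaces in the name, and then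
--     extracts the vowels and consonants from the name. It then constructs a new string `lettere_nome` by
--     alternating between consonants and vowels until the length of the new string is at least 3
--     characters long. If there are not enough consonants or vowels to complete the new string,
--     """
--     nome = nome.replace(' ', '')
--     lettere_nome = ''
--     vocali_nome = [lettera for lettera in nome if lettera.lower() in vocali]
--     consonanti_nome = [
--         lettera for lettera in nome if lettera.lower() in consonanti]
--     while len(lettere_nome) < 3:
--         if consonanti_nome:
--             lettere_nome += consonanti_nome.pop(0)
--         elif vocali_nome:
--             lettere_nome += vocali_nome.pop(0)
--         else:
--             lettere_nome += 'X'
--     return lettere_nome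
-- ===== SOURCE B (Python) =====
-- vocali = set('aeiou')
--
-- consonanti = set('bcdfghjklmnpqrstvwxyz')
--
-- def calcola_nome(nome):
--     consonanti_nome = [c for c in nome if c.lower() in consonanti]
--     vocali_nome = [c for c in nome if c.lower() in vocali]
--     return (''.join(consonanti_nome) + ''.join(vocali_nome) + 'XXX')[:3]
-- ===== Notes on version B (the rewrite author's own statement) =====
-- stated objective: simpler
-- what changed: Replaces the while-loop with pop(0) (and the preliminary space removal, which the filters make redundant) by a closed form: concatenate consonants, vowels and three pad letters and slice off the first three characters.
import Mathlib
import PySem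

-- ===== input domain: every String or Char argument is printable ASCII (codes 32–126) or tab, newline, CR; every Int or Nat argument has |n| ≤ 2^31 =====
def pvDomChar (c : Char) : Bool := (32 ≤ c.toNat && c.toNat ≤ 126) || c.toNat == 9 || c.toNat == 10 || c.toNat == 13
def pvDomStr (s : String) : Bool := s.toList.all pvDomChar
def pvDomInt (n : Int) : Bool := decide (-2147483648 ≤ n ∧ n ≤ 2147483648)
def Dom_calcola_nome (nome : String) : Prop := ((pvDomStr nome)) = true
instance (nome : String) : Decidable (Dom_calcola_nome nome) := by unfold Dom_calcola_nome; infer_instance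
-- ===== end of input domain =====

-- B replaces A's while-loop with pop(0) (and A's redundant space removal) by the closed form
-- (consonants ++ vowels ++ "XXX") sliced to three characters; objective: simpler.

-- ===== PORT A =====
-- module-level: vocali = set('aeiou'); consonanti = set('bcdfghjklmnpqrstvwxyz')
def pvVocali : List Char := PySem.Set.ofList "aeiou".toList
def pvConsonanti : List Char := PySem.Set.ofList "bcdfghjklmnpqrstvwxyz".toList

-- the while-loop of A: lettere_nome grows by one character per iteration until length 3
def calcolaLoop (lettere cons voc : List Char) : List Char :=
  if lettere.length < 3 then
    match cons with
    | c :: cs => calcolaLoop (lettere ++ [c]) cs voc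
    | [] =>
      match voc with
      | v :: vs => calcolaLoop (lettere ++ [v]) [] vs
      | [] => calcolaLoop (lettere ++ ['X']) [] []
  else lettere
termination_by 3 - lettere.length
decreasing_by all_goals simp; omega

def calcola_nome (nome : String) : String :=
  let nome1 := PySem.Str.replace nome " " ""
  let vocali_nome := nome1.toList.filter (fun c => pvVocali.contains (PySem.Chars.lowerChar c))
  let consonanti_nome := nome1.toList.filter (fun c => pvConsonanti.contains (PySem.Chars.lowerChar c))
  String.ofList (calcolaLoop [] consonanti_nome vocali_nome)

-- ===== PORT B =====
def calcola_nome_alt (nome : String) : String :=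
  let consonanti_nome := nome.toList.filter (fun c => pvConsonanti.contains (PySem.Chars.lowerChar c))
  let vocali_nome := nome.toList.filter (fun c => pvVocali.contains (PySem.Chars.lowerChar c))
  String.ofList (PySem.List.slice ((consonanti_nome ++ vocali_nome) ++ "XXX".toList) none (some 3))

-- ===== PRECONDITION & SPEC =====
def Spec_calcola_nome (nome : String) (out : String) : Prop := out = calcola_nome_alt nome
instance (nome : String) (out : String) : Decidable (Spec_calcola_nome nome out) := by unfold Spec_calcola_nome; infer_instance

-- ===== CLAIM (what is proved, stated in full; the proofs are below) =====
def Claim_equal_calcola_nome : Prop := ∀ (nome : String), Dom_calcola_nome nome → Spec_calcola_nome nome (calcola_nome nome)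

-- ===== LEMMAS AND PROOFS =====

-- replacing ' ' by '' is filtering out spaces
theorem replace_go_space (fuel : Nat) (l acc : List Char) (h : l.length ≤ fuel) :
    PySem.Chars.replace.go [' '] [] fuel l acc = acc.reverse ++ l.filter (· ≠ ' ') := by
  induction fuel generalizing l acc with
  | zero =>
    have : l = [] := List.eq_nil_of_length_eq_zero (Nat.le_zero.mp h)
    subst this; simp [PySem.Chars.replace.go]
  | succ n ih =>
    cases l with
    | nil => simp [PySem.Chars.replace.go]
    | cons c t =>
      by_cases hc : c = ' '
      · subst hc
        simp only [PySem.Chars.replace.go, List.isPrefixOf, BEq.rfl, Bool.true_and,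
          if_pos, List.length_cons, List.length_nil, List.drop_succ_cons, List.drop_zero,
          List.reverse_nil, List.nil_append]
        simp only [List.length_cons] at h
        rw [ih t _ (by omega)]
        simp
      · rw [show PySem.Chars.replace.go [' '] [] (n+1) (c :: t) acc
              = PySem.Chars.replace.go [' '] [] n t (c :: acc) by
            simp [PySem.Chars.replace.go, List.isPrefixOf, hc, (by simpa using Ne.symm hc : (' ' == c) = false)]]
        simp only [List.length_cons] at h
        rw [ih t _ (by omega)]
        simp [hc]

theorem replace_space (s : String) :
    (PySem.Str.replace s " " "").toList = s.toList.filter (· ≠ ' ') := by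
  simp only [PySem.Str.replace, PySem.Chars.replace]
  simp only [String.toList_ofList]
  rw [if_neg (by decide)]
  simpa using replace_go_space s.toList.length s.toList []

-- filtering the de-spaced string equals filtering the original, for predicates false on ' '
theorem filter_despace (p : Char → Bool) (hp : p ' ' = false) (l : List Char) :
    (l.filter (· ≠ ' ')).filter p = l.filter p := by
  rw [List.filter_filter]
  apply List.filter_congr
  intro a _
  by_cases hc : a = ' '
  · subst hc; simp [hp]
  · simp [hc]

-- closed form of A's loop
theorem calcolaLoop_closed (k : Nat) (acc c v : List Char) (h : acc.length + k = 3) :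
    calcolaLoop acc c v = acc ++ (c ++ v ++ ['X', 'X', 'X']).take k := by
  induction k generalizing acc c v with
  | zero =>
    rw [calcolaLoop.eq_def]
    simp at h
    simp [h]
  | succ n ih =>
    rw [calcolaLoop.eq_def, if_pos (by omega)]
    cases c with
    | cons a cs =>
      show calcolaLoop (acc ++ [a]) cs v = _
      rw [ih (acc ++ [a]) cs v (by simp; omega)]
      simp [List.take_succ_cons]
    | nil =>
      cases v with
      | cons b vs =>
        show calcolaLoop (acc ++ [b]) [] vs = _
        rw [ih (acc ++ [b]) [] vs (by simp; omega)]
        simp [List.take_succ_cons]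
      | nil =>
        show calcolaLoop (acc ++ ['X']) [] [] = _
        rw [ih (acc ++ ['X']) [] [] (by simp; omega)]
        have hn : n ≤ 2 := by omega
        interval_cases n <;> simp

theorem filter_eq_despaced (p : Char → Bool) (hp : p ' ' = false) (s : String) :
    (PySem.Str.replace s " " "").toList.filter p = s.toList.filter p := by
  rw [replace_space, filter_despace p hp]

-- ===== VERDICT (by name: the statement is the Claim_ definition above) =====
theorem calcola_nome_spec : Claim_equal_calcola_nome := by
  intro nome _
  unfold Spec_calcola_nome calcola_nome calcola_nome_alt
  simp only []
  rw [filter_eq_despaced _ (by decide) nome, filter_eq_despaced _ (by decide) nome]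
  rw [calcolaLoop_closed 3 [] _ _ (by simp)]
  rw [show (3:Int) = ((3:Nat):Int) from rfl, PySem.List.slice_to_natCast]
  simp [List.append_assoc]
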